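-- pv_equiv track=rewrite | github.com/Karenvn/data_note | data_note/fetch_bioproject_assemblies.py | extract_haplotype_assemblies
-- ===== SOURCE A (Python) =====
-- def extract_haplotype_assemblies(assembly_dicts, tax_id):
--     """Extract the latest haplotype assemblies from the assembly data."""
--     hap1_dict = {}
--     hap2_dict = {}
--
--     for assembly_dict in assembly_dicts:
--         name = assembly_dict['assembly_name'].lower()
--         accession = assembly_dict['assembly_set_accession']
--
--         # Identify haplotype 1 and select the latest version
--         if "hap1" in name:
--             if not hap1_dict or accession > hap1_dict["hap1_accession"]:
--                 hap1_dict = {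
--                     "hap1_accession": accession,
--                     "hap1_assembly_name": assembly_dict['assembly_name']
--                 }
--
--         # Identify haplotype 2 and select the latest version
--         elif "hap2" in name:
--             if not hap2_dict or accession > hap2_dict["hap2_accession"]:
--                 hap2_dict = {
--                     "hap2_accession": accession,
--                     "hap2_assembly_name": assembly_dict['assembly_name']
--                 }
--
--     return hap1_dict, hap2_dict
-- ===== SOURCE B (Python) =====
-- def extract_haplotype_assemblies(assembly_dicts, tax_id):
--     """Extract the latest haplotype assemblies from the assembly data."""
--     hap1_cands = [a for a in assembly_dicts
--                   if "hap1" in a['assembly_name'].lower()]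
--     hap2_cands = [a for a in assembly_dicts
--                   if "hap2" in a['assembly_name'].lower()
--                   and "hap1" not in a['assembly_name'].lower()]
--
--     def best(acc_key, name_key, cands):
--         if not cands:
--             return {}
--         b = max(cands, key=lambda a: a['assembly_set_accession'])
--         return {acc_key: b['assembly_set_accession'],
--                 name_key: b['assembly_name']}
--
--     return (best("hap1_accession", "hap1_assembly_name", hap1_cands),
--             best("hap2_accession", "hap2_assembly_name", hap2_cands))
-- ===== Notes on version B (the rewrite author's own statement) =====
-- stated objective: idiomatic
-- what changed: Replaced the single fused max-tracking loop over both haplotypes with a filter-then-reduce decomposition: build the hap1/hap2 candidate lists by comprehension, then pick each winner with max(key=accession), which preserves the elif precedence and first-seen tie-breaking.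
import Mathlib
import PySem

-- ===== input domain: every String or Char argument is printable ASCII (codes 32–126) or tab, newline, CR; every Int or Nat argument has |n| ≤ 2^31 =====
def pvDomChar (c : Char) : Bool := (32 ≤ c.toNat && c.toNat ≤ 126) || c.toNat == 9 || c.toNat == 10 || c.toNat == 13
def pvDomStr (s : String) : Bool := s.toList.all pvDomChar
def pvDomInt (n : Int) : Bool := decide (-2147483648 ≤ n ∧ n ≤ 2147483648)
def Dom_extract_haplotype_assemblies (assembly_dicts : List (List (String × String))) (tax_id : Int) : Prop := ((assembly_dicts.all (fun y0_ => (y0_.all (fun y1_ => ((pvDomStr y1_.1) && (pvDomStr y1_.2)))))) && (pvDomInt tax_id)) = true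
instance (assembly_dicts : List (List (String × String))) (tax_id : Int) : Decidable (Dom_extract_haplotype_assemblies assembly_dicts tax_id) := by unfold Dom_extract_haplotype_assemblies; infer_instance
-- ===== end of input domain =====

-- B replaces A's fused max-tracking loop by a filter-then-reduce decomposition (two
-- candidate lists, then max by accession); same cost, more idiomatic.

-- ===== PORT A =====
-- d[k] for the two input keys: Python raises KeyError when the key is absent; Pre_
-- requires both keys present in every dict, so the "" default is never consulted there.
def pvGet (d : List (String × String)) (k : String) : String :=
  (PySem.Dict.mk d).getD k ""

-- the body of A's for-loop, acting on the state (hap1_dict, hap2_dict).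
-- hap1_dict["hap1_accession"] is read only when hap1_dict ≠ []; by construction a
-- nonempty state dict always carries that key, so Python never raises there and the
-- getD default is never consulted.
def pvStepA (st : (List (String × String)) × (List (String × String)))
    (assembly_dict : List (String × String)) :
    (List (String × String)) × (List (String × String)) :=
  let name := PySem.Str.lower (pvGet assembly_dict "assembly_name")
  let accession := pvGet assembly_dict "assembly_set_accession"
  if PySem.Str.isIn "hap1" name then
    if st.1 = [] ∨ (PySem.Dict.mk st.1).getD "hap1_accession" "" < accession then
      ([("hap1_accession", accession),
        ("hap1_assembly_name", pvGet assembly_dict "assembly_name")], st.2)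
    else st
  else if PySem.Str.isIn "hap2" name then
    if st.2 = [] ∨ (PySem.Dict.mk st.2).getD "hap2_accession" "" < accession then
      (st.1, [("hap2_accession", accession),
              ("hap2_assembly_name", pvGet assembly_dict "assembly_name")])
    else st
  else st

def extract_haplotype_assemblies (assembly_dicts : List (List (String × String))) (tax_id : Int) : (List (String × String)) × (List (String × String)) :=
  assembly_dicts.foldl pvStepA ([], [])

-- ===== PORT B =====
-- best(acc_key, name_key, cands) of Source B; max(cands, key=…) is PySem.List.max?.
def pvBest (accKey nameKey : String) (cands : List (List (String × String))) :
    List (String × String) :=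
  match PySem.List.max? cands (fun a => pvGet a "assembly_set_accession") with
  | none => []
  | some b => [(accKey, pvGet b "assembly_set_accession"),
               (nameKey, pvGet b "assembly_name")]

def extract_haplotype_assemblies_alt (assembly_dicts : List (List (String × String))) (tax_id : Int) : (List (String × String)) × (List (String × String)) :=
  let hap1_cands := assembly_dicts.filter
    (fun a => PySem.Str.isIn "hap1" (PySem.Str.lower (pvGet a "assembly_name")))
  let hap2_cands := assembly_dicts.filter
    (fun a => PySem.Str.isIn "hap2" (PySem.Str.lower (pvGet a "assembly_name"))
      && !PySem.Str.isIn "hap1" (PySem.Str.lower (pvGet a "assembly_name")))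
  (pvBest "hap1_accession" "hap1_assembly_name" hap1_cands,
   pvBest "hap2_accession" "hap2_assembly_name" hap2_cands)

-- ===== PRECONDITION & SPEC =====
-- A reads d['assembly_name'] and d['assembly_set_accession'] on every dict; a missing
-- key raises KeyError, so exactly those inputs are excluded.
def Pre_extract_haplotype_assemblies (assembly_dicts : List (List (String × String))) (tax_id : Int) : Prop :=
  ∀ d ∈ assembly_dicts,
    (PySem.Dict.mk d).contains "assembly_name" = true ∧
    (PySem.Dict.mk d).contains "assembly_set_accession" = true
instance (assembly_dicts : List (List (String × String))) (tax_id : Int) : Decidable (Pre_extract_haplotype_assemblies assembly_dicts tax_id) := by unfold Pre_extract_haplotype_assemblies; infer_instance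

def pvWitness_extract_haplotype_assemblies : (List (List (String × String))) × Int :=
  ([[("assembly_name", "Ant HAP1 v2"), ("assembly_set_accession", "GCA_0002")],
    [("assembly_name", "ant hap1"), ("assembly_set_accession", "GCA_0001")],
    [("assembly_name", "ant hap2"), ("assembly_set_accession", "GCA_0003")]], 9606)

def Spec_extract_haplotype_assemblies (assembly_dicts : List (List (String × String))) (tax_id : Int) (out : (List (String × String)) × (List (String × String))) : Prop := out = extract_haplotype_assemblies_alt assembly_dicts tax_id
instance (assembly_dicts : List (List (String × String))) (tax_id : Int) (out : (List (String × String)) × (List (String × String))) : Decidable (Spec_extract_haplotype_assemblies assembly_dicts tax_id out) := by unfold Spec_extract_haplotype_assemblies; infer_instance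

-- ===== CLAIM (what is proved, stated in full; the proofs are below) =====
def Claim_equal_extract_haplotype_assemblies : Prop := ∀ (assembly_dicts : List (List (String × String))) (tax_id : Int), Dom_extract_haplotype_assemblies assembly_dicts tax_id → Pre_extract_haplotype_assemblies assembly_dicts tax_id → Spec_extract_haplotype_assemblies assembly_dicts tax_id (extract_haplotype_assemblies assembly_dicts tax_id)

-- ===== LEMMAS AND PROOFS =====

-- predicates and per-haplotype step functions used only by the proof
def pvP1 (a : List (String × String)) : Bool :=
  PySem.Str.isIn "hap1" (PySem.Str.lower (pvGet a "assembly_name"))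
def pvP2 (a : List (String × String)) : Bool :=
  PySem.Str.isIn "hap2" (PySem.Str.lower (pvGet a "assembly_name"))
    && !PySem.Str.isIn "hap1" (PySem.Str.lower (pvGet a "assembly_name"))
def pvMk1 (a : List (String × String)) : List (String × String) :=
  [("hap1_accession", pvGet a "assembly_set_accession"),
   ("hap1_assembly_name", pvGet a "assembly_name")]
def pvMk2 (a : List (String × String)) : List (String × String) :=
  [("hap2_accession", pvGet a "assembly_set_accession"),
   ("hap2_assembly_name", pvGet a "assembly_name")]
def pvStep1 (h : List (String × String)) (a : List (String × String)) : List (String × String) :=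
  if h = [] ∨ (PySem.Dict.mk h).getD "hap1_accession" "" < pvGet a "assembly_set_accession"
  then pvMk1 a else h
def pvStep2 (h : List (String × String)) (a : List (String × String)) : List (String × String) :=
  if h = [] ∨ (PySem.Dict.mk h).getD "hap2_accession" "" < pvGet a "assembly_set_accession"
  then pvMk2 a else h

lemma pvStepA_split (xs : List (List (String × String)))
    (h1 h2 : List (String × String)) :
    xs.foldl pvStepA (h1, h2) =
      ((xs.filter pvP1).foldl pvStep1 h1, (xs.filter pvP2).foldl pvStep2 h2) := by
  induction xs generalizing h1 h2 with
  | nil => rfl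
  | cons a xs ih =>
    have key : pvStepA (h1, h2) a =
        (if pvP1 a = true then pvStep1 h1 a else h1,
         if pvP2 a = true then pvStep2 h2 a else h2) := by
      unfold pvStepA pvStep1 pvStep2 pvMk1 pvMk2 pvP1 pvP2
      cases hA : PySem.Chars.isIn ['h', 'a', 'p', '1'] (PySem.Chars.lower (pvGet a "assembly_name").toList) <;>
        cases hB : PySem.Chars.isIn ['h', 'a', 'p', '2'] (PySem.Chars.lower (pvGet a "assembly_name").toList) <;>
          simp [hA, hB] <;> split <;> rfl
    have hnot : pvP1 a = true → pvP2 a = false := by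
      simp only [pvP1, pvP2]
      intro h
      simp at h
      simp [h]
    rw [List.foldl_cons, List.filter_cons, List.filter_cons, key]
    cases hP1 : pvP1 a with
    | true =>
      rw [hnot hP1]
      simpa using ih (pvStep1 h1 a) h2
    | false =>
      cases hP2 : pvP2 a with
      | true => simpa using ih h1 (pvStep2 h2 a)
      | false => simpa using ih h1 h2

lemma pvGetD_mk1 (a : List (String × String)) :
    (PySem.Dict.mk (pvMk1 a)).getD "hap1_accession" "" = pvGet a "assembly_set_accession" := by
  rfl

lemma pvGetD_mk2 (a : List (String × String)) :
    (PySem.Dict.mk (pvMk2 a)).getD "hap2_accession" "" = pvGet a "assembly_set_accession" := by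
  rfl

-- running A's hap1 update loop from a nonempty seed mk1 b is Python's max fold
lemma pvFold1_mk (cands : List (List (String × String))) (b : List (String × String)) :
    cands.foldl pvStep1 (pvMk1 b) =
      pvMk1 (cands.foldl
        (fun m x => if pvGet m "assembly_set_accession" < pvGet x "assembly_set_accession" then x else m) b) := by
  induction cands generalizing b with
  | nil => rfl
  | cons a t ih =>
    simp only [List.foldl_cons]
    have hne : pvMk1 b ≠ [] := by simp [pvMk1]
    by_cases hlt : pvGet b "assembly_set_accession" < pvGet a "assembly_set_accession"
    · rw [show pvStep1 (pvMk1 b) a = pvMk1 a from by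
        simp [pvStep1, pvGetD_mk1, hlt], if_pos hlt, ih]
    · rw [show pvStep1 (pvMk1 b) a = pvMk1 b from by
        simp [pvStep1, pvGetD_mk1, hlt, hne], if_neg hlt, ih]

lemma pvFold2_mk (cands : List (List (String × String))) (b : List (String × String)) :
    cands.foldl pvStep2 (pvMk2 b) =
      pvMk2 (cands.foldl
        (fun m x => if pvGet m "assembly_set_accession" < pvGet x "assembly_set_accession" then x else m) b) := by
  induction cands generalizing b with
  | nil => rfl
  | cons a t ih =>
    simp only [List.foldl_cons]
    have hne : pvMk2 b ≠ [] := by simp [pvMk2]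
    by_cases hlt : pvGet b "assembly_set_accession" < pvGet a "assembly_set_accession"
    · rw [show pvStep2 (pvMk2 b) a = pvMk2 a from by
        simp [pvStep2, pvGetD_mk2, hlt], if_pos hlt, ih]
    · rw [show pvStep2 (pvMk2 b) a = pvMk2 b from by
        simp [pvStep2, pvGetD_mk2, hlt, hne], if_neg hlt, ih]

lemma pvMax?_eq_fold (cands : List (List (String × String))) (b : List (String × String)) :
    PySem.List.max? (b :: cands) (fun a => pvGet a "assembly_set_accession") =
      some (cands.foldl
        (fun m x => if pvGet m "assembly_set_accession" < pvGet x "assembly_set_accession" then x else m) b) := by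
  show List.foldl _ (some b) cands = _
  induction cands generalizing b with
  | nil => rfl
  | cons a t ih =>
    simp only [List.foldl_cons]
    by_cases hlt : pvGet b "assembly_set_accession" < pvGet a "assembly_set_accession"
    · rw [if_pos hlt]
      simpa [hlt] using ih a
    · rw [if_neg hlt]
      simpa [hlt] using ih b

lemma pvFold1_best (cands : List (List (String × String))) :
    cands.foldl pvStep1 [] = pvBest "hap1_accession" "hap1_assembly_name" cands := by
  cases cands with
  | nil => rfl
  | cons b t =>
    rw [List.foldl_cons, show pvStep1 [] b = pvMk1 b from by simp [pvStep1],
      pvFold1_mk, pvBest, pvMax?_eq_fold]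
    rfl

lemma pvFold2_best (cands : List (List (String × String))) :
    cands.foldl pvStep2 [] = pvBest "hap2_accession" "hap2_assembly_name" cands := by
  cases cands with
  | nil => rfl
  | cons b t =>
    rw [List.foldl_cons, show pvStep2 [] b = pvMk2 b from by simp [pvStep2],
      pvFold2_mk, pvBest, pvMax?_eq_fold]
    rfl

-- ===== VERDICT (by name: the statement is the Claim_ definition above) =====
theorem extract_haplotype_assemblies_spec : Claim_equal_extract_haplotype_assemblies := by
  intro xs tax_id _ _
  show extract_haplotype_assemblies xs tax_id = extract_haplotype_assemblies_alt xs tax_id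
  rw [extract_haplotype_assemblies, pvStepA_split, pvFold1_best, pvFold2_best]
  rfl
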